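-- pv_equiv track=rewrite | github.com/ronxldwilson/disruptiq-notes | obfuscation-checker-agent/example-repo/control-flow-obfuscation.py | unnecessary_states
-- ===== SOURCE A (Python) =====
-- def unnecessary_states(input_val):
--     state = "init"
--     result = input_val
--
--     while state != "end":
--         if state == "init":
--             state = "process"
--         elif state == "process":
--             result = result * 2
--             state = "validate"
--         elif state == "validate":
--             if result > 100:
--                 state = "adjust"
--             else:
--                 state = "finalize"
--         elif state == "adjust":
--             result = result - 50
--             state = "finalize"
--         elif state == "finalize":
--             state = "end"
--         else:
--             state = "error"  # dead state
--
--     return result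
-- ===== SOURCE B (Python) =====
-- def unnecessary_states(input_val):
--     result = input_val * 2
--     if result > 100:
--         result -= 50
--     return result
-- ===== Notes on version B (the rewrite author's own statement) =====
-- stated objective: simpler
-- what changed: Replaced the string-keyed state-machine while-loop with the straight-line arithmetic it encodes: double the input, subtract 50 if the result exceeds 100.
import Mathlib
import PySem

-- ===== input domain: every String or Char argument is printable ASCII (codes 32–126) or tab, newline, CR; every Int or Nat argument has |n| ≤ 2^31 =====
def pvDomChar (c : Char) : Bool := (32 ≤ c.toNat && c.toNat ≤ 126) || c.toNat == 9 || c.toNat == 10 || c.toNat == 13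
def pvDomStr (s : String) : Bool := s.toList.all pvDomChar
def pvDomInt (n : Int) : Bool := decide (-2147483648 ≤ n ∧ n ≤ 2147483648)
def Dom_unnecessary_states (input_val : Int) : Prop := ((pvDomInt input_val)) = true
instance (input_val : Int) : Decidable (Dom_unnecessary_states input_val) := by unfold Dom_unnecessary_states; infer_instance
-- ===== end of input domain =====

-- B replaces A's state-machine loop with the straight-line arithmetic it encodes (simpler).
-- ===== PORT A =====
-- Literal port of A's while-loop over the state string. From "init" the Python loop always
-- reaches "end" within 5 iterations; the unreachable "error" state would loop forever in Python,
-- so the recursion carries a fuel of 6, which the reachable executions never exhaust.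
def pvLoopA : Nat → String → Int → Int
  | 0, _, result => result
  | Nat.succ fuel, state, result =>
    if state = "end" then result
    else if state = "init" then pvLoopA fuel "process" result
    else if state = "process" then pvLoopA fuel "validate" (result * 2)
    else if state = "validate" then
      if result > 100 then pvLoopA fuel "adjust" result else pvLoopA fuel "finalize" result
    else if state = "adjust" then pvLoopA fuel "finalize" (result - 50)
    else if state = "finalize" then pvLoopA fuel "end" result
    else pvLoopA fuel "error" result

def unnecessary_states (input_val : Int) : Int := pvLoopA 6 "init" input_val

-- ===== PORT B =====
def unnecessary_states_alt (input_val : Int) : Int :=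
  let result := input_val * 2
  if result > 100 then result - 50 else result

-- ===== PRECONDITION & SPEC =====
def Spec_unnecessary_states (input_val : Int) (out : Int) : Prop := out = unnecessary_states_alt input_val
instance (input_val : Int) (out : Int) : Decidable (Spec_unnecessary_states input_val out) := by unfold Spec_unnecessary_states; infer_instance

-- ===== CLAIM (what is proved, stated in full; the proofs are below) =====
def Claim_equal_unnecessary_states : Prop := ∀ (input_val : Int), Dom_unnecessary_states input_val → Spec_unnecessary_states input_val (unnecessary_states input_val)

-- ===== LEMMAS AND PROOFS =====

-- ===== VERDICT (by name: the statement is the Claim_ definition above) =====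
theorem unnecessary_states_spec : Claim_equal_unnecessary_states := by
  intro input_val _
  unfold Spec_unnecessary_states unnecessary_states unnecessary_states_alt
  by_cases h : input_val * 2 > 100 <;> simp [pvLoopA, h]
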